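-- pv_equiv track=rewrite | github.com/Siddhesh25082001/Infytq-Preparation | Assignment-4/2.py | encrypt_sentence
-- ===== SOURCE A (Python) =====
-- vowels = ['a', 'e', 'i', 'o', 'u']
--
-- def encrypt_sentence(sentence):
--
--     #start writing your code here
--     l = []
--     for word in sentence:
--         l = sentence.split(" ")
--
--     data = []
--     for index, word in enumerate(l):
--         if (index + 1) % 2 != 0:
--             data.append(word[::-1])
--         else:
--             vowel = []
--             consonant = []
--
--             for element in word:
--                 if element in vowels:
--                     vowel.append(element)
--                 else:
--                     consonant.append(element)
--
--             consonant.extend(vowel)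
--             data.append("".join(consonant))
--
--     return " ".join(data)
-- ===== SOURCE B (Python) =====
-- vowels = ['a', 'e', 'i', 'o', 'u']
--
-- def encrypt_sentence(sentence):
--     return " ".join(
--         word[::-1] if index % 2 == 0
--         else "".join(sorted(word, key=lambda c: c in vowels))
--         for index, word in enumerate(sentence.split(" ")))
-- ===== Notes on version B (the rewrite author's own statement) =====
-- stated objective: faster
-- what changed: Drops A's redundant per-character loop that re-splits the whole sentence on every character, splits once, and replaces the two-bucket consonant/vowel partition with a single stable sort keyed on vowel membership (False before True), building the result in one join over enumerate.
import Mathlib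
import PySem

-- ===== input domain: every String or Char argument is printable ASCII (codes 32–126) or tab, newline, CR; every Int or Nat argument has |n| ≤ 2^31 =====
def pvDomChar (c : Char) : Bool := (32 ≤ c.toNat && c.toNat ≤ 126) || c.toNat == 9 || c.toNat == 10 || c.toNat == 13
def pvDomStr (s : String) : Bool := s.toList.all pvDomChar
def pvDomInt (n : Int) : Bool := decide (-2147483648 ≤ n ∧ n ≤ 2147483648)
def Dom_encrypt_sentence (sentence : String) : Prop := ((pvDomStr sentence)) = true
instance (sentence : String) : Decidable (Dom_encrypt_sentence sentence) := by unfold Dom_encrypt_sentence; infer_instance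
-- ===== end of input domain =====

-- B replaces A's redundant re-splitting loop and two-bucket partition with one split,
-- enumerate, and a stable sort keyed on 'is vowel' (idiomatic; same return value).

-- ===== PORT A =====
def pvVowels : List Char := ['a', 'e', 'i', 'o', 'u']

def encrypt_sentence (sentence : String) : String :=
  -- l = []; for word in sentence: l = sentence.split(" ")
  let l : List (List Char) :=
    sentence.toList.foldl (fun _ _ => PySem.Chars.splitOn sentence.toList [' ']) []
  -- data = []; for index, word in enumerate(l): …
  let data : List (List Char) :=
    (PySem.List.enumerate l).foldl (fun data iw =>
      if PySem.Int.mod (iw.1 + 1) 2 ≠ 0 then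
        data ++ [(PySem.List.slice? iw.2 none none (-1)).getD []]  -- word[::-1]; step ≠ 0, never none
      else
        let cv := iw.2.foldl
          (fun (cv : List Char × List Char) element =>
            if element ∈ pvVowels then (cv.1, cv.2 ++ [element]) else (cv.1 ++ [element], cv.2))
          ([], [])
        data ++ [cv.1 ++ cv.2]) []
  String.ofList (PySem.Chars.join [' '] data)

-- ===== PORT B =====
def encrypt_sentence_alt (sentence : String) : String :=
  String.ofList (PySem.Chars.join [' ']
    ((PySem.List.enumerate (PySem.Chars.splitOn sentence.toList [' '])).map (fun iw =>
      if PySem.Int.mod iw.1 2 = 0 then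
        (PySem.List.slice? iw.2 none none (-1)).getD []  -- word[::-1]
      else
        -- "".join(sorted(word, key=lambda c: c in vowels)); bool key → 0/1
        PySem.List.sorted iw.2 (fun c => if c ∈ pvVowels then (1 : Nat) else 0))))

-- ===== PRECONDITION & SPEC =====
def Spec_encrypt_sentence (sentence : String) (out : String) : Prop := out = encrypt_sentence_alt sentence
instance (sentence : String) (out : String) : Decidable (Spec_encrypt_sentence sentence out) := by unfold Spec_encrypt_sentence; infer_instance

-- ===== CLAIM (what is proved, stated in full; the proofs are below) =====
def Claim_equal_encrypt_sentence : Prop := ∀ (sentence : String), Dom_encrypt_sentence sentence → Spec_encrypt_sentence sentence (encrypt_sentence sentence)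

-- ===== LEMMAS AND PROOFS =====

-- a constant-valued foldl over a nonempty list returns the constant
theorem pv_foldl_const {α β : Type} (v : β) (a : β) (x : α) (xs : List α) :
    List.foldl (fun _ _ => v) a (x :: xs) = v := by
  induction xs generalizing a with
  | nil => rfl
  | cons y ys ih => exact ih v

-- A's two-bucket partition fold = (consonants, vowels) filters
theorem pv_partition (xs cs vs : List Char) :
    xs.foldl
      (fun (cv : List Char × List Char) element =>
        if element ∈ pvVowels then (cv.1, cv.2 ++ [element]) else (cv.1 ++ [element], cv.2))
      (cs, vs)
    = (cs ++ xs.filter (fun e => !decide (e ∈ pvVowels)),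
       vs ++ xs.filter (fun e => decide (e ∈ pvVowels))) := by
  induction xs generalizing cs vs with
  | nil => simp
  | cons x xs ih =>
    by_cases hx : x ∈ pvVowels <;> simp [hx, ih]

-- insertBy skips a prefix it does not insert before
theorem pv_insertBy_append (x : Char) (before : Char → Char → Bool) (cs vs : List Char)
    (h : ∀ c ∈ cs, before x c = false) :
    PySem.List.insertBy before x (cs ++ vs) = cs ++ PySem.List.insertBy before x vs := by
  induction cs with
  | nil => simp
  | cons c cs ih =>
    have hc : before x c = false := h c (by simp)
    simp [PySem.List.insertBy, hc]
    exact ih (fun c' hc' => h c' (by simp [hc']))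

-- insertBy puts x in front when x goes before every element
theorem pv_insertBy_front (x : Char) (before : Char → Char → Bool) (vs : List Char)
    (h : ∀ v ∈ vs, before x v = true) :
    PySem.List.insertBy before x vs = x :: vs := by
  cases vs with
  | nil => rfl
  | cons v t => simp [PySem.List.insertBy, h v (by simp)]

-- invariant of the stable insertion sort with the 0/1 vowel key
theorem pv_sort_inv (xs cs vs : List Char)
    (hc : ∀ c ∈ cs, ¬ c ∈ pvVowels) (hv : ∀ v ∈ vs, v ∈ pvVowels) :
    xs.foldl
      (fun acc x => PySem.List.insertBy
        (fun a b => decide ((if a ∈ pvVowels then (1 : Nat) else 0) < (if b ∈ pvVowels then (1 : Nat) else 0))) x acc)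
      (cs ++ vs)
    = (cs ++ xs.filter (fun e => !decide (e ∈ pvVowels)))
      ++ (vs ++ xs.filter (fun e => decide (e ∈ pvVowels))) := by
  induction xs generalizing cs vs with
  | nil => simp
  | cons x xs ih =>
    by_cases hx : x ∈ pvVowels
    · -- vowel: key 1, goes to the very end
      have hall : ∀ y ∈ cs ++ vs,
          (decide ((if x ∈ pvVowels then (1 : Nat) else 0) < (if y ∈ pvVowels then (1 : Nat) else 0))) = false := by
        intro y _; by_cases hy : y ∈ pvVowels <;> simp [hx, hy]
      rw [List.foldl_cons, PySem.List.insertBy_of_forall_not_before _ _ _ hall]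
      have : cs ++ vs ++ [x] = cs ++ (vs ++ [x]) := by simp
      rw [this, ih cs (vs ++ [x]) hc (by intro v hvm; rcases List.mem_append.1 hvm with h | h
                                         · exact hv v h
                                         · simp at h; simpa [h] using hx)]
      simp [hx]
    · -- consonant: key 0, inserted after cs, before all of vs
      have hskip : ∀ c ∈ cs,
          (decide ((if x ∈ pvVowels then (1 : Nat) else 0) < (if c ∈ pvVowels then (1 : Nat) else 0))) = false := by
        intro c hcm; simp [hx, hc c hcm]
      have hfront : ∀ v ∈ vs,
          (decide ((if x ∈ pvVowels then (1 : Nat) else 0) < (if v ∈ pvVowels then (1 : Nat) else 0))) = true := by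
        intro v hvm; simp [hx, hv v hvm]
      rw [List.foldl_cons, pv_insertBy_append _ _ _ _ hskip, pv_insertBy_front _ _ _ hfront]
      have : cs ++ (x :: vs) = (cs ++ [x]) ++ vs := by simp
      rw [this, ih (cs ++ [x]) vs (by intro c hcm; rcases List.mem_append.1 hcm with h | h
                                      · exact hc c h
                                      · simp at h; simpa [h] using hx) hv]
      simp [hx]

-- sorted with the vowel key = consonants then vowels, each in original order
theorem pv_sorted_eq_partition (xs : List Char) :
    PySem.List.sorted xs (fun c => if c ∈ pvVowels then (1 : Nat) else 0)
    = xs.filter (fun e => !decide (e ∈ pvVowels)) ++ xs.filter (fun e => decide (e ∈ pvVowels)) := by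
  rw [PySem.List.sorted_eq_foldl_insertBy]
  simpa using pv_sort_inv xs [] [] (by simp) (by simp)

-- branch conditions of A and B coincide
theorem pv_mod_parity (i : Int) :
    (PySem.Int.mod (i + 1) 2 ≠ 0) ↔ (PySem.Int.mod i 2 = 0) := by
  simp only [PySem.Int.mod, Int.fmod_eq_emod]
  omega

-- per-word bodies of A and B agree
theorem pv_body_eq (iw : Int × List Char) :
    (if PySem.Int.mod (iw.1 + 1) 2 ≠ 0 then
        (PySem.List.slice? iw.2 none none (-1)).getD []
      else
        let cv := iw.2.foldl
          (fun (cv : List Char × List Char) element =>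
            if element ∈ pvVowels then (cv.1, cv.2 ++ [element]) else (cv.1 ++ [element], cv.2))
          ([], [])
        cv.1 ++ cv.2)
    = (if PySem.Int.mod iw.1 2 = 0 then
        (PySem.List.slice? iw.2 none none (-1)).getD []
      else
        PySem.List.sorted iw.2 (fun c => if c ∈ pvVowels then (1 : Nat) else 0)) := by
  by_cases h : PySem.Int.mod iw.1 2 = 0
  · rw [if_pos ((pv_mod_parity iw.1).2 h), if_pos h]
  · rw [if_neg (fun hne => h ((pv_mod_parity iw.1).1 hne)), if_neg h]
    simp only [pv_partition iw.2 [] [], pv_sorted_eq_partition, List.nil_append]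

-- A's data-accumulating fold is B's map
theorem pv_dataA_eq (l : List (Int × List Char)) (acc : List (List Char)) :
    l.foldl (fun data iw =>
      if PySem.Int.mod (iw.1 + 1) 2 ≠ 0 then
        data ++ [(PySem.List.slice? iw.2 none none (-1)).getD []]
      else
        let cv := iw.2.foldl
          (fun (cv : List Char × List Char) element =>
            if element ∈ pvVowels then (cv.1, cv.2 ++ [element]) else (cv.1 ++ [element], cv.2))
          ([], [])
        data ++ [cv.1 ++ cv.2]) acc
    = acc ++ l.map (fun iw =>
        if PySem.Int.mod iw.1 2 = 0 then
          (PySem.List.slice? iw.2 none none (-1)).getD []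
        else
          PySem.List.sorted iw.2 (fun c => if c ∈ pvVowels then (1 : Nat) else 0)) := by
  induction l generalizing acc with
  | nil => simp
  | cons iw l ih =>
    rw [List.foldl_cons, ih, List.map_cons]
    have hstep : (if PySem.Int.mod (iw.1 + 1) 2 ≠ 0 then
        acc ++ [(PySem.List.slice? iw.2 none none (-1)).getD []]
      else
        let cv := iw.2.foldl
          (fun (cv : List Char × List Char) element =>
            if element ∈ pvVowels then (cv.1, cv.2 ++ [element]) else (cv.1 ++ [element], cv.2))
          ([], [])
        acc ++ [cv.1 ++ cv.2])
      = acc ++ [if PySem.Int.mod iw.1 2 = 0 then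
          (PySem.List.slice? iw.2 none none (-1)).getD []
        else
          PySem.List.sorted iw.2 (fun c => if c ∈ pvVowels then (1 : Nat) else 0)] := by
      rw [← pv_body_eq iw]
      split <;> rfl
    rw [hstep]
    simp

-- ===== VERDICT (by name: the statement is the Claim_ definition above) =====
theorem encrypt_sentence_spec : Claim_equal_encrypt_sentence := by
  intro sentence _
  unfold Spec_encrypt_sentence encrypt_sentence encrypt_sentence_alt
  cases h : sentence.toList with
  | nil =>
    decide
  | cons c rest =>
    simp only [pv_foldl_const, pv_dataA_eq, List.nil_append]
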